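-- pv_equiv track=rewrite | github.com/rinleit/hackerrank-solutions | problem-solving/Search/Count Luck/dfs_solutions.py | countLuck
-- ===== SOURCE A (Python) =====
-- from itertools import product
--
-- def countLuck(matrix, k):
--     maps = set() # maps : non-tree grid
--     start = None # start : M spots on maps
--     finish = None # finish : * spots in maps
--     for p in product( range(len(matrix)), range(len(matrix[0])) ):
--         if matrix[p[0]][p[1]] == 'X': continue
--         maps.add(p)
--         if matrix[p[0]][p[1]]=='*': finish = p
--         elif matrix[p[0]][p[1]]=='M': start = p
--     # next step by step
--     steps = [ (-1,0), (1,0), (0,-1), (0,1) ]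
--     next_steps = lambda p : maps & set((p[0]+i, p[1]+j) for (i,j) in steps)
--     # DFS Algorithms
--     visited, stack, paths = set(), [start], dict()
--     while stack:
--         p = stack.pop()
--         if p in visited: continue
--         if p == finish: break
--         visited.add(p)
--         for q in next_steps(p):
--             if q not in visited:
--                 stack.append(q)
--                 paths[q] = p
--     # get waves
--     curr_step, prev_step, waves  = finish, None, 0
--     while (curr_step != None):
--         prev_step = curr_step
--         curr_step = paths.get(curr_step, None)
--         if prev_step != finish and len(next_steps(prev_step) - set([curr_step])) > 1:
--             waves += 1
--     return "Impressed" if waves == k else "Oops!"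
-- ===== SOURCE B (Python) =====
-- def countLuck(matrix, k):
--     # one-pass DFS carrying the fork count on the stack: no parent map, no path reconstruction
--     width = len(matrix[0])
--     cells = set()
--     start = finish = None
--     for i, row in enumerate(matrix):
--         for j, ch in enumerate(row[:width]):
--             if ch == 'X':
--                 continue
--             cells.add((i, j))
--             if ch == '*':
--                 finish = (i, j)
--             elif ch == 'M':
--                 start = (i, j)
--
--     def neighbours(c):
--         return cells & {(c[0] - 1, c[1]), (c[0] + 1, c[1]), (c[0], c[1] - 1), (c[0], c[1] + 1)}
--
--     waves = 0
--     seen = set()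
--     todo = [(start, None, 0)]
--     while todo:
--         cell, origin, luck = todo.pop()
--         if cell in seen:
--             continue
--         if cell == finish:
--             waves = luck
--             break
--         seen.add(cell)
--         nbrs = neighbours(cell)
--         if len(nbrs - {origin}) > 1:
--             luck += 1
--         for nxt in nbrs:
--             if nxt not in seen:
--                 todo.append((nxt, cell, luck))
--     return "Impressed" if waves == k else "Oops!"
-- ===== Notes on version B (the rewrite author's own statement) =====
-- stated objective: simpler
-- what changed: A runs a stack DFS that records a parent map and then walks the parent chain back from the finish counting decision forks; B is a single enumerate-based scan plus one stack DFS whose entries carry (cell, came-from, fork count), so the parent dict and the whole reconstruction pass disappear.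
import Mathlib
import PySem

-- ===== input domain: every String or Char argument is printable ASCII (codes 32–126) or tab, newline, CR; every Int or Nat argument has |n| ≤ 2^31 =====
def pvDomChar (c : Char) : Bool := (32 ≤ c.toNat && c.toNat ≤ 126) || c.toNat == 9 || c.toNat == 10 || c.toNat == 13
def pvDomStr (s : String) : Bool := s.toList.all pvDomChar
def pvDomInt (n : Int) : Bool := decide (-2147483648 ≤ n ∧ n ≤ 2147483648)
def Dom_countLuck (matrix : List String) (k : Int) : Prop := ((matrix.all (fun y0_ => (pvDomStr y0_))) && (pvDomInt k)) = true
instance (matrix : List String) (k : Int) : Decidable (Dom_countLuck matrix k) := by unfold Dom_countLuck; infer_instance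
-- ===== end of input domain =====

-- B replaces A's two-phase DFS (parent map + back-walk over the found path) by a single DFS that
-- carries the fork count on the stack; objective: simpler (no parent dict, no reconstruction pass).

-- ===== PORT A =====
-- A-side helpers: grid scan, and the neighbour set `maps & set(...)` including CPython's
-- set iteration order (8-slot open-addressing hash table), ported by hand, exact.

abbrev pvCell := Int × Int

-- CPython hash() of an int: n mod (2^61-1) keeping sign, -1 ↦ -2 (exact for |n| < 2^61-1), cast to uint64
def pvIntHash (n : Int) : UInt64 :=
  if 0 ≤ n then UInt64.ofNat (n.toNat % 2305843009213693951)
  else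
    let h : Int := -((((-n).toNat % 2305843009213693951 : Nat) : Int))
    let h : Int := if h = -1 then -2 else h
    UInt64.ofNat (h + 18446744073709551616).toNat

def pvLane (acc lane : UInt64) : UInt64 :=
  (((acc + lane * 14029467366897019727) <<< 31) ||| ((acc + lane * 14029467366897019727) >>> 33)) * 11400714785074694791

-- CPython hash of a pair of ints (tuple xxHash, 64-bit), exact
def pvTupHash (p : pvCell) : UInt64 :=
  let acc := pvLane (pvLane 2870177450012600261 (pvIntHash p.1)) (pvIntHash p.2)
  let acc := acc + (2 ^^^ (2870177450012600261 ^^^ 3527539))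
  if acc = 18446744073709551615 then 1546275796 else acc

-- CPython set_add_entry probing on an 8-slot table (LINEAR_PROBES skipped since 8 ≤ 9), exact;
-- fuel 64 ≥ any probe chain on a table that has a free slot
def pvProbe (t : List (Option pvCell)) (x : pvCell) : Nat → UInt64 → Nat → List (Option pvCell)
  | 0, _, _ => t
  | fl+1, perturb, i =>
    match t.getD i none with
    | none => t.set i (some x)
    | some y =>
      if y = x then t
      else pvProbe t x fl (perturb >>> 5) ((5*i + 1 + (perturb >>> 5).toNat) % 8)

def pvTblIns (t : List (Option pvCell)) (x : pvCell) : List (Option pvCell) :=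
  pvProbe t x 64 (pvTupHash x) ((pvTupHash x).toNat % 8)

-- the iteration order of a CPython set of ≤ 4 cells built by inserting xs in order (slot order)
def pvOrd (xs : List pvCell) : List pvCell :=
  (xs.foldl pvTblIns (List.replicate 8 none)).filterMap id

-- `maps & set((p[0]+i, p[1]+j) for (i,j) in steps)` iterated: CPython intersects by scanning the
-- smaller operand and inserting hits into a fresh 8-slot set; exact including iteration order
def pvNext (maps : PySem.Set pvCell) (p : pvCell) : List pvCell :=
  let cand : List pvCell := [(p.1 - 1, p.2), (p.1 + 1, p.2), (p.1, p.2 - 1), (p.1, p.2 + 1)]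
  let it := if maps.length < 4 then (pvOrd maps).filter (fun x => cand.contains x)
            else (pvOrd cand).filter (fun x => maps.contains x)
  pvOrd it

-- matrix[i][j] (none where Python raises IndexError — those inputs are outside Pre_)
def pvCharAt (matrix : List String) (i j : Int) : Option Char :=
  match PySem.List.pyGet? matrix i with
  | none => none
  | some s => PySem.Str.pyGet? s j

def pvProd (R C : Int) : List pvCell :=
  (PySem.List.pyRange 0 R 1).flatMap (fun i => (PySem.List.pyRange 0 C 1).map (fun j => (i, j)))

-- the scan loop: maps, start ('M'), finish ('*'); len(matrix[0]) of an empty matrix raises (outside Pre_)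
def pvScanStep (matrix : List String)
    (acc : PySem.Set pvCell × Option pvCell × Option pvCell) (p : pvCell) :
    PySem.Set pvCell × Option pvCell × Option pvCell :=
  match pvCharAt matrix p.1 p.2 with
  | some 'X' => acc
  | ch =>
    let maps := PySem.Set.add acc.1 p
    if ch = some '*' then (maps, acc.2.1, some p)
    else if ch = some 'M' then (maps, some p, acc.2.2)
    else (maps, acc.2.1, acc.2.2)

def pvScan (matrix : List String) : PySem.Set pvCell × Option pvCell × Option pvCell :=
  let C : Int := match PySem.List.pyGet? matrix 0 with | some s => PySem.Str.len s | none => 0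
  (pvProd matrix.length C).foldl (pvScanStep matrix) (PySem.Set.empty, none, none)

-- A's DFS loop; returns the parent map `paths`. fuel is a totality guard only (proved sufficient);
-- next_steps(None) raises TypeError in Python (outside Pre_): here that branch just continues.
def pvLoopA (maps : PySem.Set pvCell) (finish : Option pvCell) :
    Nat → PySem.Set (Option pvCell) → List (Option pvCell) → PySem.Dict pvCell pvCell →
    PySem.Dict pvCell pvCell
  | 0, _, _, paths => paths
  | _+1, _, [], paths => paths
  | fl+1, visited, p :: rest, paths =>
    if PySem.Set.contains visited p then pvLoopA maps finish fl visited rest paths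
    else if p = finish then paths
    else
      match p with
      | none => pvLoopA maps finish fl (PySem.Set.add visited none) rest paths
      | some pc =>
        let visited' := PySem.Set.add visited (some pc)
        let sp := (pvNext maps pc).foldl
          (fun (sp : List (Option pvCell) × PySem.Dict pvCell pvCell) q =>
            if PySem.Set.contains visited' (some q) then sp
            else (some q :: sp.1, sp.2.insert q pc))
          (rest, paths)
        pvLoopA maps finish fl visited' sp.1 sp.2

-- A's back-walk over the parent chain, counting forks; fuel is a totality guard (proved sufficient)
def pvWalk (maps : PySem.Set pvCell) (finish : Option pvCell) (paths : PySem.Dict pvCell pvCell) :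
    Nat → Option pvCell → Int → Int
  | 0, _, w => w
  | _+1, none, w => w
  | fl+1, some p, w =>
    let nxt := paths.get? p
    let w' := if (some p ≠ finish) ∧ ((pvNext maps p).filter (fun q => decide (some q ≠ nxt))).length > 1
              then w + 1 else w
    pvWalk maps finish paths fl nxt w'

def countLuck (matrix : List String) (k : Int) : String :=
  let s := pvScan matrix
  let maps := s.1
  let start := s.2.1
  let finish := s.2.2
  let paths := pvLoopA maps finish (1 + 9 * (1 + maps.length)) PySem.Set.empty [start] (PySem.Dict.mk [])
  let waves := pvWalk maps finish paths (maps.length + 2) finish 0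
  if waves = k then "Impressed" else "Oops!"

-- ===== PORT B =====
-- B-side helpers, coded independently of A's: the CPython set-order model rewritten in
-- match/cond style with one combined probe recursion, a scan over enumerate(row) instead of an
-- index product, and a single DFS whose stack entries carry (cell, origin, luck) — no parent
-- map and no back-walk.

-- CPython hash() of an int, negative case folded into one Nat subtraction
def altHash (n : Int) : UInt64 :=
  let r : Nat := n.natAbs % 2305843009213693951
  cond (decide (n < 0))
    (UInt64.ofNat (18446744073709551616 - cond (r == 1) 2 r))
    (UInt64.ofNat r)

def altMix (acc lane : UInt64) : UInt64 :=
  let t := acc + lane * 14029467366897019727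
  ((t <<< 31) ||| (t >>> 33)) * 11400714785074694791

-- CPython hash of an int pair (tuple xxHash) as a fold over the two lane hashes
def altPairHash (a b : Int) : UInt64 :=
  let v := [altHash a, altHash b].foldl altMix 2870177450012600261 + (2 ^^^ (2870177450012600261 ^^^ 3527539))
  cond (v == 18446744073709551615) 1546275796 v

-- CPython set_add_entry probing on an 8-slot table, one combined recursion
def altSeek (x : Int × Int) (t : List (Option (Int × Int))) : UInt64 → Nat → Nat → List (Option (Int × Int))
  | _, _, 0 => t
  | pb, i, f+1 =>
    match t.getD i none with
    | none => t.set i (some x)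
    | some y => cond (y == x) t (altSeek x t (pb >>> 5) ((5*i + 1 + (pb >>> 5).toNat) % 8) f)

def altStore (t : List (Option (Int × Int))) (c : Int × Int) : List (Option (Int × Int)) :=
  altSeek c t (altPairHash c.1 c.2) ((altPairHash c.1 c.2).toNat % 8) 64

def altFill : List (Int × Int) → List (Option (Int × Int)) → List (Option (Int × Int))
  | [], t => t
  | c :: cs, t => altFill cs (altStore t c)

-- iteration (slot) order of a CPython set of ≤ 4 cells built by inserting xs in order
def altOrder (xs : List (Int × Int)) : List (Int × Int) :=
  (altFill xs (List.replicate 8 none)).reduceOption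

-- `cells & {up, down, left, right}` iterated, scanning the smaller operand, CPython-exact
def altNbrs (cells : PySem.Set (Int × Int)) (c : Int × Int) : List (Int × Int) :=
  let cand : List (Int × Int) := [(c.1 - 1, c.2), (c.1 + 1, c.2), (c.1, c.2 - 1), (c.1, c.2 + 1)]
  altOrder (cond (decide (cells.length ≤ 3))
    ((altOrder cells).filter (fun z => cand.contains z))
    ((altOrder cand).filter (fun z => cells.contains z)))

-- one cell of the scan: skip 'X', record the open cell, remember '*' / 'M'
def altVisitCell (a : PySem.Set (Int × Int) × Option (Int × Int) × Option (Int × Int))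
    (i j : Int) (ch : Char) : PySem.Set (Int × Int) × Option (Int × Int) × Option (Int × Int) :=
  cond (ch == 'X') a
    (let cs := PySem.Set.add a.1 (i, j)
     cond (ch == '*') (cs, a.2.1, some (i, j))
       (cond (ch == 'M') (cs, some (i, j), a.2.2) (cs, a.2.1, a.2.2)))

-- `for i, row in enumerate(matrix): for j, ch in enumerate(row[:width]): ...`
def altScan (matrix : List String) : PySem.Set (Int × Int) × Option (Int × Int) × Option (Int × Int) :=
  let width := (matrix.headD "").toList.length
  (PySem.List.enumerate matrix).foldl
    (fun a row =>
      (PySem.List.enumerate (row.2.toList.take width)).foldl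
        (fun a' jc => altVisitCell a' row.1 jc.1 jc.2) a)
    (PySem.Set.empty, none, none)

-- the single DFS: pop (cell, origin, luck); at finish return luck; otherwise bump luck when the
-- open neighbours other than origin number more than one, and push unseen neighbours
def altRun (cells : PySem.Set (Int × Int)) (finish : Option (Int × Int)) :
    Nat → PySem.Set (Option (Int × Int)) → List (Option (Int × Int) × Option (Int × Int) × Int) → Int
  | 0, _, _ => 0
  | _+1, _, [] => 0
  | f+1, seen, (cell, origin, luck) :: todo =>
    cond (PySem.Set.contains seen cell) (altRun cells finish f seen todo)
      (cond (cell == finish) luck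
        (match cell with
         | none => altRun cells finish f (PySem.Set.add seen none) todo
         | some c =>
           let seen' := PySem.Set.add seen (some c)
           let ns := altNbrs cells c
           let luck' := luck + cond (decide (1 < (ns.filter (fun z => !(some z == origin))).length)) 1 0
           altRun cells finish f seen'
             (ns.foldl (fun td z => cond (PySem.Set.contains seen' (some z)) td ((some z, some c, luck') :: td)) todo)))

def countLuck_alt (matrix : List String) (k : Int) : String :=
  match altScan matrix with
  | (cells, start, finish) =>
    let waves := altRun cells finish (9 * cells.length + 10) PySem.Set.empty [(start, none, 0)]
    cond (waves == k) "Impressed" "Oops!"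

-- ===== PRECONDITION & SPEC =====
-- Pre_ = exactly the inputs on which Python A returns: a nonempty matrix, no row shorter than row 0
-- (else IndexError in the scan), and an 'M' among the scanned columns unless no '*' is there
-- (otherwise the DFS starts at None and next_steps(None) raises TypeError).
def Pre_countLuck (matrix : List String) (k : Int) : Prop :=
  matrix ≠ [] ∧
  (∀ s ∈ matrix, (matrix.headD "").toList.length ≤ s.toList.length) ∧
  ((matrix.any fun s => ((s.toList.take (matrix.headD "").toList.length).contains 'M')) = true ∨
   (matrix.all fun s => !((s.toList.take (matrix.headD "").toList.length).contains '*')) = true)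

instance (matrix : List String) (k : Int) : Decidable (Pre_countLuck matrix k) := by
  unfold Pre_countLuck; infer_instance

def pvWitness_countLuck : List String × Int := (["M*"], 0)

def Spec_countLuck (matrix : List String) (k : Int) (out : String) : Prop := out = countLuck_alt matrix k
instance (matrix : List String) (k : Int) (out : String) : Decidable (Spec_countLuck matrix k out) := by
  unfold Spec_countLuck; infer_instance

-- ===== CLAIM (what is proved, stated in full; the proofs are below) =====
def Claim_equal_countLuck : Prop := ∀ (matrix : List String) (k : Int), Dom_countLuck matrix k → Pre_countLuck matrix k → Spec_countLuck matrix k (countLuck matrix k)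

-- ===== LEMMAS AND PROOFS =====

-- proof-side intermediate: B's DFS restated over A's helpers (pvNext, if-form); altRun is
-- proved equal to it below, and pvMain relates it to A's loop + back-walk
def pvLoopB (maps : PySem.Set pvCell) (finish : Option pvCell) :
    Nat → PySem.Set (Option pvCell) → List (Option pvCell × Option pvCell × Int) → Int
  | 0, _, _ => 0
  | _+1, _, [] => 0
  | fl+1, visited, (x, came, luck) :: rest =>
    if PySem.Set.contains visited x then pvLoopB maps finish fl visited rest
    else if x = finish then luck
    else
      match x with
      | none => pvLoopB maps finish fl (PySem.Set.add visited none) rest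
      | some xc =>
        let visited' := PySem.Set.add visited (some xc)
        let ns := pvNext maps xc
        let luck' := if ((ns.filter (fun q => decide (some q ≠ came))).length > 1) then luck + 1 else luck
        let stack' := ns.foldl
          (fun st q => if PySem.Set.contains visited' (some q) then st else (some q, some xc, luck') :: st)
          rest
        pvLoopB maps finish fl visited' stack'

-- ---- bridges: B's helpers compute A's hash/order model ----

theorem altHash_eq (n : Int) : altHash n = pvIntHash n := by
  unfold altHash pvIntHash
  by_cases h : 0 ≤ n
  · have e : n.natAbs = n.toNat := by omega
    simp [h, show ¬ n < 0 by omega, e]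
  · have hneg : n < 0 := by omega
    have e : (-n).toNat = n.natAbs := by omega
    simp only [if_neg h, hneg, decide_true, cond_true, e]
    congr 1
    have hrlt : n.natAbs % 2305843009213693951 < 2305843009213693951 := Nat.mod_lt _ (by norm_num)
    rcases eq_or_ne (n.natAbs % 2305843009213693951) 1 with h1 | h1
    · rw [h1]
      norm_num
      rfl
    · have hb : ((n.natAbs % 2305843009213693951 == 1) : Bool) = false := by
        simpa using h1
      rw [hb]
      have hne : ¬ (-((n.natAbs % 2305843009213693951 : Nat) : Int) = -1) := by omega
      rw [if_neg hne]
      simp only [cond_false]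
      omega

theorem altMix_eq (a b : UInt64) : altMix a b = pvLane a b := rfl

theorem altPairHash_eq (p : pvCell) : altPairHash p.1 p.2 = pvTupHash p := by
  unfold altPairHash pvTupHash
  simp only [List.foldl_cons, List.foldl_nil, altMix_eq, altHash_eq]
  rcases eq_or_ne (pvLane (pvLane 2870177450012600261 (pvIntHash p.1)) (pvIntHash p.2) +
      (2 ^^^ (2870177450012600261 ^^^ 3527539))) 18446744073709551615 with h | h
  · simp [cond_eq_if, beq_iff_eq, h]
  · simp [cond_eq_if, beq_iff_eq, h]

theorem altSeek_eq (x : pvCell) :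
    ∀ (f : Nat) (t : List (Option pvCell)) (pb : UInt64) (i : Nat),
      altSeek x t pb i f = pvProbe t x f pb i := by
  intro f
  induction f with
  | zero => intro t pb i; rfl
  | succ f ih =>
    intro t pb i
    unfold altSeek pvProbe
    rcases hg : t.getD i none with _ | y
    · simp only [hg]
    · simp only [hg]
      rcases eq_or_ne y x with h | h
      · simp [h]
      · simp only [cond_eq_if, beq_iff_eq, if_neg h]
        exact ih _ _ _

theorem altStore_eq (t : List (Option pvCell)) (c : pvCell) : altStore t c = pvTblIns t c := by
  unfold altStore pvTblIns
  rw [altSeek_eq, altPairHash_eq]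

theorem altFill_eq : ∀ (xs : List pvCell) (t : List (Option pvCell)),
    altFill xs t = xs.foldl pvTblIns t := by
  intro xs
  induction xs with
  | nil => intro t; rfl
  | cons c cs ih =>
    intro t
    unfold altFill
    rw [ih, altStore_eq, List.foldl_cons]

theorem altOrder_eq (xs : List pvCell) : altOrder xs = pvOrd xs := by
  unfold altOrder pvOrd
  rw [altFill_eq]
  rfl

theorem altNbrs_eq (cells : PySem.Set pvCell) (c : pvCell) : altNbrs cells c = pvNext cells c := by
  unfold altNbrs pvNext
  dsimp only
  by_cases h : cells.length ≤ 3
  · rw [if_pos (show cells.length < 4 by omega),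
      show decide (cells.length ≤ 3) = true by simpa using h, cond_true]
    simp only [altOrder_eq]
  · rw [if_neg (show ¬ cells.length < 4 by omega),
      show decide (cells.length ≤ 3) = false by simpa using h, cond_false]
    simp only [altOrder_eq]

-- ---- bridge: B's scan equals A's scan on Pre_-shaped matrices ----

theorem altVisit_eq (matrix : List String)
    (a : PySem.Set pvCell × Option pvCell × Option pvCell) (i j : Int) (c : Char)
    (h : pvCharAt matrix i j = some c) :
    pvScanStep matrix a (i, j) = altVisitCell a i j c := by
  unfold pvScanStep altVisitCell
  rw [h]
  rcases eq_or_ne c 'X' with hX | hX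
  · subst hX
    simp
  · rcases eq_or_ne c '*' with hs | hs
    · subst hs
      simp
    · rcases eq_or_ne c 'M' with hm | hm
      · subst hm
        simp
      · simp [cond_eq_if, beq_iff_eq, hX, hs, hm]

theorem pvRow_eq (matrix : List String) (W : Nat) (i : Int) (s : String)
    (hget : PySem.List.pyGet? matrix i = some s) (hW : W ≤ s.toList.length)
    (acc : PySem.Set pvCell × Option pvCell × Option pvCell) :
    (((PySem.List.pyRange 0 (W : Int) 1).map (fun j => (i, j))).foldl (pvScanStep matrix) acc)
      = (PySem.List.enumerate (s.toList.take W)).foldl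
          (fun a jc => altVisitCell a i jc.1 jc.2) acc := by
  rw [List.foldl_map]
  rw [PySem.List.enumerate_eq_map_pyRange _ ' ', List.foldl_map]
  have hlt : (s.toList.take W).length = W := by
    rw [List.length_take]
    omega
  rw [show PySem.List.len (s.toList.take W) = (W : Int) by rw [PySem.List.len_eq, hlt]]
  apply PySem.List.foldl_congr_mem
  intro a j hj
  rw [PySem.List.mem_pyRange_one] at hj
  have hjW : j.toNat < W := by omega
  have hchar : pvCharAt matrix i j = some (s.toList[j.toNat]'(by omega)) := by
    unfold pvCharAt
    rw [hget]
    dsimp only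
    rw [PySem.Str.pyGet?_eq, PySem.Chars.pyGet?_eq_listPyGet?]
    rw [PySem.List.pyGet?_eq_some_getElem _ hj.1 (by push_cast; omega)]
  rw [altVisit_eq matrix a i j _ hchar]
  dsimp only
  congr 1
  rw [PySem.List.pyGetD_eq_getElem _ _ hj.1 (by rw [hlt]; push_cast; omega)]
  exact (List.getElem_take).symm

theorem pvGrid_eq (matrix : List String) (W : Nat)
    (hW : ∀ s ∈ matrix, W ≤ s.toList.length)
    (acc : PySem.Set pvCell × Option pvCell × Option pvCell) :
    (pvProd matrix.length (W : Int)).foldl (pvScanStep matrix) acc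
      = (PySem.List.enumerate matrix).foldl
          (fun a row => (PySem.List.enumerate (row.2.toList.take W)).foldl
            (fun a' jc => altVisitCell a' row.1 jc.1 jc.2) a) acc := by
  unfold pvProd
  rw [List.foldl_flatMap]
  rw [PySem.List.enumerate_eq_map_pyRange _ "", List.foldl_map, PySem.List.len_eq]
  apply PySem.List.foldl_congr_mem
  intro a i hi
  rw [PySem.List.mem_pyRange_one] at hi
  have hiN : i.toNat < matrix.length := by omega
  have hgetD : PySem.List.pyGetD matrix i "" = matrix[i.toNat]'hiN :=
    PySem.List.pyGetD_eq_getElem _ _ hi.1 (by push_cast; omega)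
  rw [hgetD]
  exact pvRow_eq matrix W i _
    (PySem.List.pyGet?_eq_some_getElem _ hi.1 (by push_cast; omega))
    (hW _ (List.getElem_mem hiN)) a

theorem altScan_eq (matrix : List String) (hne : matrix ≠ [])
    (hlen : ∀ s ∈ matrix, (matrix.headD "").toList.length ≤ s.toList.length) :
    altScan matrix = pvScan matrix := by
  obtain ⟨m, ms, rfl⟩ : ∃ m ms, matrix = m :: ms := by
    cases matrix with
    | nil => exact absurd rfl hne
    | cons m ms => exact ⟨m, ms, rfl⟩
  unfold altScan pvScan
  dsimp only
  rw [PySem.List.pyGet?_zero_cons]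
  dsimp only
  simp only [List.headD_cons, PySem.Str.len_eq]
  exact (pvGrid_eq (m :: ms) m.toList.length (by simpa using hlen) _).symm

-- ---- bridge: B's DFS equals the if-form loop ----

theorem altRun_eq (cells : PySem.Set pvCell) (finish : Option pvCell) :
    ∀ (f : Nat) (seen : PySem.Set (Option pvCell))
      (todo : List (Option pvCell × Option pvCell × Int)),
      altRun cells finish f seen todo = pvLoopB cells finish f seen todo := by
  intro f
  induction f with
  | zero => intro seen todo; rfl
  | succ f ih =>
    intro seen todo
    rcases todo with _ | ⟨⟨x, came, luck⟩, rest⟩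
    · rfl
    · rcases hc : PySem.Set.contains seen x with _ | _
      · simp only [altRun, pvLoopB, hc, cond_false, Bool.false_eq_true, if_false]
        rcases eq_or_ne x finish with hf | hf
        · simp [hf]
        · have hb : (x == finish) = false := by simpa using hf
          rw [hb]
          simp only [cond_false, if_neg hf]
          cases x with
          | none => exact ih _ _
          | some xc =>
            dsimp only
            rw [altNbrs_eq]
            have hfun : (fun z : pvCell => !(some z == came)) = (fun q : pvCell => decide (some q ≠ came)) := by
              funext z
              by_cases hz : (some z : Option pvCell) = came <;> simp [hz]
            rw [hfun]
            have hluck : ∀ L : Nat,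
                luck + cond (decide (1 < L)) 1 0 = if (L > 1) then luck + 1 else luck := by
              intro L
              by_cases h1 : 1 < L <;> simp [h1]
            rw [hluck]
            have hpush : (fun td (z : pvCell) =>
                  cond (PySem.Set.contains (PySem.Set.add seen (some xc)) (some z)) td
                    ((some z, some xc,
                      if ((pvNext cells xc).filter (fun q => decide (some q ≠ came))).length > 1
                      then luck + 1 else luck) :: td))
                = (fun st (q : pvCell) =>
                  if PySem.Set.contains (PySem.Set.add seen (some xc)) (some q) then st
                  else (some q, some xc,
                      if ((pvNext cells xc).filter (fun q => decide (some q ≠ came))).length > 1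
                      then luck + 1 else luck) :: st) := by
              funext td z
              rw [cond_eq_if]
            rw [hpush]
            exact ih _ _
      · simp only [altRun, pvLoopB, hc, cond_true, if_true]
        exact ih _ _

-- ---- hash-table output lemmas ----

theorem pvProbe_length (t : List (Option pvCell)) (x : pvCell) :
    ∀ (fl : Nat) (perturb : UInt64) (i : Nat), (pvProbe t x fl perturb i).length = t.length := by
  intro fl
  induction fl with
  | zero => intro _ _; rfl
  | succ fl ih =>
    intro perturb i
    unfold pvProbe
    split
    · simp [List.length_set]
    · split
      · rfl
      · exact ih _ _

theorem pvProbe_mem (t : List (Option pvCell)) (x z : pvCell) :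
    ∀ (fl : Nat) (perturb : UInt64) (i : Nat),
      some z ∈ pvProbe t x fl perturb i → some z ∈ t ∨ z = x := by
  intro fl
  induction fl with
  | zero => intro _ _ h; exact Or.inl h
  | succ fl ih =>
    intro perturb i h
    unfold pvProbe at h
    split at h
    · rcases List.mem_or_eq_of_mem_set h with h' | h'
      · exact Or.inl h'
      · exact Or.inr (by injection h')
    · split at h
      · exact Or.inl h
      · exact ih _ _ h

theorem pvFoldIns_length (xs : List pvCell) :
    ∀ t : List (Option pvCell), (xs.foldl pvTblIns t).length = t.length := by
  induction xs with
  | nil => intro t; rfl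
  | cons x xs ih =>
    intro t
    simp only [List.foldl_cons]
    rw [ih, pvTblIns, pvProbe_length]

theorem pvFoldIns_mem (xs : List pvCell) (z : pvCell) :
    ∀ t : List (Option pvCell), some z ∈ xs.foldl pvTblIns t → some z ∈ t ∨ z ∈ xs := by
  induction xs with
  | nil => intro t h; exact Or.inl h
  | cons x xs ih =>
    intro t h
    simp only [List.foldl_cons] at h
    rcases ih _ h with h' | h'
    · rcases pvProbe_mem _ _ _ _ _ _ h' with h'' | h''
      · exact Or.inl h''
      · exact Or.inr (by simp [h''])
    · exact Or.inr (by simp [h'])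

theorem pvOrd_sub (xs : List pvCell) (z : pvCell) (h : z ∈ pvOrd xs) : z ∈ xs := by
  unfold pvOrd at h
  rw [List.mem_filterMap] at h
  obtain ⟨a, ha, hz⟩ := h
  have : some z ∈ xs.foldl pvTblIns (List.replicate 8 none) := by
    cases a <;> simp at hz; subst hz; exact ha
  rcases pvFoldIns_mem _ _ _ this with h' | h'
  · exact absurd (List.eq_of_mem_replicate h') (by simp)
  · exact h'

theorem pvOrd_len (xs : List pvCell) : (pvOrd xs).length ≤ 8 := by
  unfold pvOrd
  calc ((xs.foldl pvTblIns (List.replicate 8 none)).filterMap id).length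
      ≤ (xs.foldl pvTblIns (List.replicate 8 none)).length := List.length_filterMap_le _ _
    _ = 8 := by rw [pvFoldIns_length]; simp

theorem pvNext_sub_maps (maps : PySem.Set pvCell) (p q : pvCell) (h : q ∈ pvNext maps p) :
    q ∈ maps := by
  unfold pvNext at h
  have h' := pvOrd_sub _ _ h
  by_cases hl : maps.length < 4 <;> simp only [hl, if_true, if_false] at h'
  · exact pvOrd_sub _ _ (List.mem_of_mem_filter h')
  · rw [List.mem_filter] at h'
    exact List.mem_of_elem_eq_true h'.2

theorem pvNext_ne_self (maps : PySem.Set pvCell) (p q : pvCell) (h : q ∈ pvNext maps p) :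
    q ≠ p := by
  unfold pvNext at h
  have h' := pvOrd_sub _ _ h
  have hc : q ∈ [(p.1 - 1, p.2), (p.1 + 1, p.2), (p.1, p.2 - 1), (p.1, p.2 + 1)] := by
    by_cases hl : maps.length < 4 <;> simp only [hl, if_true, if_false] at h'
    · rw [List.mem_filter] at h'
      exact List.mem_of_elem_eq_true h'.2
    · exact pvOrd_sub _ _ (List.mem_of_mem_filter h')
  intro hqp
  subst hqp
  simp at hc
  rcases hc with h1 | h1 | h1 | h1 <;> rw [Prod.ext_iff] at h1 <;> omega

theorem pvNext_len (maps : PySem.Set pvCell) (p : pvCell) : (pvNext maps p).length ≤ 8 :=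
  pvOrd_len _

-- ---- generic list facts ----

theorem pvLen_le_of_nodup_subset {α : Type} [DecidableEq α] (l1 l2 : List α)
    (h1 : l1.Nodup) (h2 : l1 ⊆ l2) : l1.length ≤ l2.length := by
  calc l1.length = l1.toFinset.card := by rw [List.toFinset_card_of_nodup h1]
    _ ≤ l2.toFinset.card := Finset.card_le_card (by intro a ha; simp at ha ⊢; exact h2 ha)
    _ ≤ l2.length := l2.toFinset_card_le

theorem pvSet_add_len {α : Type} [BEq α] [LawfulBEq α] (s : PySem.Set α) (x : α) (h : ¬ x ∈ s) :
    (PySem.Set.add s x).length = s.length + 1 := by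
  unfold PySem.Set.add
  rw [if_neg (by simpa [PySem.Set.contains_iff] using h)]
  simp

-- ---- walk lemmas ----

theorem pvWalk_none (maps : PySem.Set pvCell) (finish : Option pvCell)
    (paths : PySem.Dict pvCell pvCell) (n : Nat) (w : Int) :
    pvWalk maps finish paths n none w = w := by
  cases n <;> rfl

theorem pvWalk_acc (maps : PySem.Set pvCell) (finish : Option pvCell)
    (paths : PySem.Dict pvCell pvCell) :
    ∀ (n : Nat) (c : Option pvCell) (w : Int),
      pvWalk maps finish paths n c w = w + pvWalk maps finish paths n c 0 := by
  intro n
  induction n with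
  | zero => intro c w; simp [pvWalk]
  | succ n ih =>
    intro c w
    cases c with
    | none => simp [pvWalk]
    | some p =>
      simp only [pvWalk]
      split
      · rw [ih _ (w + 1), ih _ (0 + 1)] <;> ring
      · rw [ih _ w, ih _ 0] <;> ring

theorem pvWalk_stab (maps : PySem.Set pvCell) (finish : Option pvCell)
    (p p' : PySem.Dict pvCell pvCell) (visited : PySem.Set (Option pvCell))
    (hval : ∀ x y, p.get? x = some y → some y ∈ visited)
    (hagree : ∀ c : pvCell, some c ∈ visited → p'.get? c = p.get? c) :
    ∀ (n : Nat) (f : Option pvCell) (w : Int), (f = none ∨ f ∈ visited) →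
      pvWalk maps finish p' n f w = pvWalk maps finish p n f w := by
  intro n
  induction n with
  | zero => intro f w _; rfl
  | succ n ih =>
    intro f w hf
    cases f with
    | none => simp [pvWalk]
    | some c =>
      have hc : some c ∈ visited := hf.resolve_left (by simp)
      have hg : p'.get? c = p.get? c := hagree c hc
      simp only [pvWalk, hg]
      apply ih
      rcases hq : p.get? c with _ | y
      · exact Or.inl rfl
      · exact Or.inr (hval _ _ hq)

-- ---- stack/paths fold characterization ----

def pvFirst : List (Option pvCell × Option pvCell × Int) → Option pvCell → Option (Option pvCell × Int)
  | [], _ => none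
  | e :: r, q => if e.1 = q then some (e.2.1, e.2.2) else pvFirst r q

theorem pvFirst_append (r : List (Option pvCell × Option pvCell × Int)) (q : Option pvCell) :
    ∀ l, pvFirst (l ++ r) q = ((pvFirst l q).elim (pvFirst r q) some) := by
  intro l
  induction l with
  | nil => simp [pvFirst]
  | cons e l ih =>
    by_cases he : e.1 = q <;> simp [pvFirst, he, ih]

theorem pvFirst_pushed (xc : pvCell) (luck' : Int) (q : Option pvCell) :
    ∀ (G : List pvCell),
      pvFirst (G.map (fun c => (some c, some xc, luck'))) q =
        if q ∈ G.map some then some (some xc, luck') else none := by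
  intro G
  induction G with
  | nil => rfl
  | cons c G ih =>
    by_cases hc : some c = q
    · simp [pvFirst, hc]
    · have hqc : ¬ q = some c := fun h => hc h.symm
      by_cases hm : q ∈ List.map some G <;> simp [pvFirst, if_neg hc, ih, hqc, hm]

theorem pvFoldA_eq (visited' : PySem.Set (Option pvCell)) (xc : pvCell) :
    ∀ (ns : List pvCell) (r : List (Option pvCell)) (pa : PySem.Dict pvCell pvCell),
      ns.foldl (fun (sp : List (Option pvCell) × PySem.Dict pvCell pvCell) q =>
          if PySem.Set.contains visited' (some q) then sp
          else (some q :: sp.1, sp.2.insert q xc)) (r, pa)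
        = ((ns.filter (fun q => !PySem.Set.contains visited' (some q))).reverse.map some ++ r,
           (ns.filter (fun q => !PySem.Set.contains visited' (some q))).foldl (fun d q => d.insert q xc) pa) := by
  intro ns
  induction ns with
  | nil => intro r pa; rfl
  | cons q ns ih =>
    intro r pa
    rw [List.foldl_cons, List.filter_cons]
    cases hq : PySem.Set.contains visited' (some q) with
    | true =>
      rw [if_pos rfl, if_neg (by decide)]
      exact ih r pa
    | false =>
      rw [if_neg (by decide), if_pos (by decide)]
      dsimp only
      rw [ih]
      simp

theorem pvFoldB_eq (visited' : PySem.Set (Option pvCell)) (xc : pvCell) (luck' : Int) :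
    ∀ (ns : List pvCell) (r : List (Option pvCell × Option pvCell × Int)),
      ns.foldl (fun st q => if PySem.Set.contains visited' (some q) then st
          else (some q, some xc, luck') :: st) r
        = (ns.filter (fun q => !PySem.Set.contains visited' (some q))).reverse.map
            (fun q => (some q, some xc, luck')) ++ r := by
  intro ns
  induction ns with
  | nil => intro r; rfl
  | cons q ns ih =>
    intro r
    rw [List.foldl_cons, List.filter_cons]
    cases hq : PySem.Set.contains visited' (some q) with
    | true =>
      rw [if_pos rfl, if_neg (by decide)]
      exact ih r
    | false =>
      rw [if_neg (by decide), if_pos (by decide)]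
      rw [ih]
      simp

theorem pvInsertAll_get? (xc : pvCell) :
    ∀ (F : List pvCell) (pa : PySem.Dict pvCell pvCell) (z : pvCell),
      (F.foldl (fun d q => d.insert q xc) pa).get? z = if z ∈ F then some xc else pa.get? z := by
  intro F
  induction F with
  | nil => intro pa z; simp
  | cons q F ih =>
    intro pa z
    simp only [List.foldl_cons, ih, List.mem_cons]
    by_cases hzF : z ∈ F
    · simp [hzF]
    · by_cases hzq : z = q
      · subst hzq; simp [hzF, PySem.Dict.get?_insert_self]
      · simp [hzF, hzq, PySem.Dict.get?_insert_of_ne _ _ hzq]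

-- ---- the simulation invariant ----

def pvU (maps : PySem.Set pvCell) : List (Option pvCell) := none :: maps.map some

structure PvInv (maps : PySem.Set pvCell) (finish : Option pvCell)
    (visited : PySem.Set (Option pvCell))
    (stackB : List (Option pvCell × Option pvCell × Int))
    (paths : PySem.Dict pvCell pvCell) : Prop where
  hnd : visited.Nodup
  hv : ∀ x ∈ visited, x ∈ pvU maps
  hs : ∀ e ∈ stackB, e.1 ∈ pvU maps
  hfin : finish ∉ visited
  hval : ∀ x y, paths.get? x = some y → some y ∈ visited
  hkey : ∀ x y, paths.get? x = some y → some x ∉ visited → some x ∈ stackB.map (·.1)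
  hfe : ∀ q f L, q ∉ visited → pvFirst stackB q = some (f, L) →
        (f = none ∨ f ∈ visited) ∧
        (match q with
         | none => f = none ∧ L = 0
         | some c => paths.get? c = f ∧
             ∀ n, visited.length ≤ n → L = pvWalk maps finish paths n f 0)

theorem pvVis_le (maps : PySem.Set pvCell) (visited : PySem.Set (Option pvCell))
    (hnd : visited.Nodup) (hv : ∀ x ∈ visited, x ∈ pvU maps) :
    visited.length ≤ 1 + maps.length := by
  have := pvLen_le_of_nodup_subset visited (pvU maps) hnd hv
  simp only [pvU, List.length_cons, List.length_map] at this
  omega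

theorem pvWalk_empty (maps : PySem.Set pvCell) (finish : Option pvCell)
    (paths : PySem.Dict pvCell pvCell) (visited : PySem.Set (Option pvCell))
    (hfin : finish ∉ visited)
    (hkey0 : ∀ x y, paths.get? x = some y → some x ∈ visited)
    (wf : Nat) (hwf : 1 ≤ wf) :
    pvWalk maps finish paths wf finish 0 = 0 := by
  cases finish with
  | none => exact pvWalk_none _ _ _ _ _
  | some fc =>
    obtain ⟨wf', rfl⟩ : ∃ w', wf = w' + 1 := ⟨wf - 1, by omega⟩
    have hg : paths.get? fc = none := by
      rcases hq : paths.get? fc with _ | y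
      · rfl
      · exact absurd (hkey0 _ _ hq) hfin
    simp only [pvWalk, hg]
    rw [if_neg (by simp)]
    exact pvWalk_none _ _ _ _ _

-- the main simulation: A's loop + back-walk equals B's annotated loop
theorem pvMain (maps : PySem.Set pvCell) (finish : Option pvCell) :
    ∀ (fuel : Nat) (visited : PySem.Set (Option pvCell))
      (stackB : List (Option pvCell × Option pvCell × Int)) (paths : PySem.Dict pvCell pvCell),
      PvInv maps finish visited stackB paths →
      stackB.length + 9 * (1 + maps.length - visited.length) ≤ fuel →
      ∀ wf, maps.length + 2 ≤ wf →
      pvWalk maps finish (pvLoopA maps finish fuel visited (stackB.map (·.1)) paths) wf finish 0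
        = pvLoopB maps finish fuel visited stackB := by
  intro fuel
  induction fuel with
  | zero =>
    intro visited stackB paths hInv hPhi wf hwf
    have hsb : stackB = [] := by
      cases stackB with
      | nil => rfl
      | cons e r => simp only [List.length_cons] at hPhi; omega
    subst hsb
    simp only [pvLoopA, pvLoopB]
    exact pvWalk_empty maps finish paths visited hInv.hfin
      (fun x y h => by
        by_contra hx
        have := hInv.hkey x y h hx
        simp at this)
      wf (by omega)
  | succ fl ih =>
    intro visited stackB paths hInv hPhi wf hwf
    cases stackB with
    | nil =>
      simp only [pvLoopA, pvLoopB]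
      exact pvWalk_empty maps finish paths visited hInv.hfin
        (fun x y h => by
          by_contra hx
          have := hInv.hkey x y h hx
          simp at this)
        wf (by omega)
    | cons e rest =>
      obtain ⟨x, f0, L0⟩ := e
      by_cases hxv : x ∈ visited
      · -- skip: already visited
        have hc : PySem.Set.contains visited x = true := (PySem.Set.contains_iff _ _).mpr hxv
        simp only [List.map_cons, pvLoopA, pvLoopB, hc, if_pos]
        apply ih
        · exact { hnd := hInv.hnd, hv := hInv.hv,
                  hs := fun e he => hInv.hs e (List.mem_cons_of_mem _ he),
                  hfin := hInv.hfin, hval := hInv.hval,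
                  hkey := by
                    intro z y hz hzv
                    have := hInv.hkey z y hz hzv
                    simp only [List.map_cons, List.mem_cons] at this
                    rcases this with h | h
                    · exact absurd (h ▸ hxv) hzv
                    · exact h,
                  hfe := by
                    intro q f L hq hfirst
                    refine hInv.hfe q f L hq ?_
                    simp only [pvFirst, if_neg (show ¬ x = q from fun h => hq (h ▸ hxv))]
                    exact hfirst }
        · simp at hPhi ⊢; omega
        · exact hwf
      · have hc : ¬ (PySem.Set.contains visited x = true) := by
          rw [PySem.Set.contains_iff]; exact hxv
        by_cases hxf : x = finish
        · -- break at finish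
          subst hxf
          simp only [List.map_cons, pvLoopA, pvLoopB, hc, if_neg, ite_false, if_pos,
            Bool.false_eq_true, not_false_eq_true]
          have hfirst : pvFirst ((x, f0, L0) :: rest) x = some (f0, L0) := by
            simp [pvFirst]
          have hprop := hInv.hfe x f0 L0 hxv hfirst
          cases x with
          | none =>
            obtain ⟨_, hf0, hL0⟩ := hprop
            rw [hL0]
            exact pvWalk_none _ _ _ _ _
          | some c =>
            obtain ⟨hf0vis, hg, hL⟩ := hprop
            obtain ⟨wf', rfl⟩ : ∃ w', wf = w' + 1 := ⟨wf - 1, by omega⟩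
            simp only [pvWalk, hg]
            rw [if_neg (by simp)]
            rw [pvWalk_acc]
            have hvl : visited.length ≤ 1 + maps.length := pvVis_le maps visited hInv.hnd hInv.hv
            rw [← hL wf' (by omega)]
            ring
        · -- visit x
          simp only [List.map_cons, pvLoopA, pvLoopB, hc, if_neg, ite_false,
            Bool.false_eq_true, not_false_eq_true, hxf]
          cases x with
          | none =>
            -- Python would raise TypeError here (outside Pre_); both ports just continue
            have hInv' : PvInv maps finish (PySem.Set.add visited none) rest paths := by
              refine { hnd := PySem.Set.nodup_add visited none hInv.hnd,
                       hv := ?_, hs := fun e he => hInv.hs e (List.mem_cons_of_mem _ he),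
                       hfin := ?_, hval := ?_, hkey := ?_, hfe := ?_ }
              · intro z hz
                rcases (PySem.Set.mem_add _ _ _).mp hz with h | h
                · exact hInv.hv z h
                · subst h; simp [pvU]
              · intro h
                rcases (PySem.Set.mem_add _ _ _).mp h with h | h
                · exact hInv.hfin h
                · exact hxf h.symm
              · intro z y hz
                exact (PySem.Set.mem_add _ _ _).mpr (Or.inl (hInv.hval z y hz))
              · intro z y hz hzv
                have hzv0 : some z ∉ visited := fun h => hzv ((PySem.Set.mem_add _ _ _).mpr (Or.inl h))
                have := hInv.hkey z y hz hzv0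
                simp only [List.map_cons, List.mem_cons] at this
                rcases this with h | h
                · exact absurd h.symm (by simp)
                · exact h
              · intro q f L hq hfirst
                have hq0 : q ∉ visited := fun h => hq ((PySem.Set.mem_add _ _ _).mpr (Or.inl h))
                have hqn : q ≠ none := by
                  intro h; subst h
                  exact hq ((PySem.Set.mem_add _ _ _).mpr (Or.inr rfl))
                have := hInv.hfe q f L hq0 (by
                  simpa only [pvFirst,
                    if_neg (show ¬((none : Option pvCell) = q) from fun h => hqn h.symm)] using hfirst)
                refine ⟨?_, ?_⟩
                · rcases this.1 with h | h
                  · exact Or.inl h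
                  · exact Or.inr ((PySem.Set.mem_add _ _ _).mpr (Or.inl h))
                · cases q with
                  | none => exact this.2
                  | some c =>
                    refine ⟨this.2.1, ?_⟩
                    intro n hn
                    refine this.2.2 n ?_
                    have : (PySem.Set.add visited none).length = visited.length + 1 :=
                      pvSet_add_len visited none hxv
                    omega
            apply ih _ _ _ hInv'
            · have hlen : (PySem.Set.add visited none).length = visited.length + 1 :=
                pvSet_add_len visited none hxv
              have hvl : (PySem.Set.add visited none).length ≤ 1 + maps.length :=
                pvVis_le maps _ hInv'.hnd hInv'.hv
              simp only [List.length_cons] at hPhi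
              omega
            · exact hwf
          | some xc =>
            dsimp only
            rw [pvFoldA_eq]
            rw [pvFoldB_eq]
            -- abbreviations
            have hvlen' : (visited.add (some xc)).length = visited.length + 1 :=
              pvSet_add_len visited (some xc) hxv
            have hxcv' : some xc ∈ visited.add (some xc) :=
              (PySem.Set.mem_add _ _ _).mpr (Or.inr rfl)
            have hsubv : ∀ z, z ∈ visited → z ∈ visited.add (some xc) :=
              fun z hz => (PySem.Set.mem_add _ _ _).mpr (Or.inl hz)
            have hfirst0 : pvFirst ((some xc, f0, L0) :: rest) (some xc) = some (f0, L0) := by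
              simp [pvFirst]
            have hhead : (f0 = none ∨ f0 ∈ visited) ∧ (paths.get? xc = f0 ∧
                ∀ n, visited.length ≤ n → L0 = pvWalk maps finish paths n f0 0) :=
              hInv.hfe (some xc) f0 L0 hxv hfirst0
            have hf0vis := hhead.1
            have hg0 := hhead.2.1
            have hL0w := hhead.2.2
            set visited' := visited.add (some xc) with hvisdef
            set ns := pvNext maps xc with hnsdef
            set F := ns.filter (fun q => !PySem.Set.contains visited' (some q)) with hFdef
            set paths' := F.foldl (fun d q => d.insert q xc) paths with hpadef
            set luck' := if ((ns.filter (fun q => decide (some q ≠ f0))).length > 1)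
              then L0 + 1 else L0 with hluckdef
            set stackB' := F.reverse.map (fun q => ((some q : Option pvCell), (some xc : Option pvCell), luck')) ++ rest with hsbdef
            -- facts about F
            have hFsub : ∀ q, q ∈ F → q ∈ ns := fun q hq => List.mem_of_mem_filter hq
            have hFnotv : ∀ q, q ∈ F → some q ∉ visited' := by
              intro q hq hmem
              have hb := (List.mem_filter.mp hq).2
              rw [(PySem.Set.contains_iff _ _).mpr hmem] at hb
              exact absurd hb (by decide)
            have hxcF : xc ∉ F := fun h => pvNext_ne_self maps xc xc (hFsub _ h) rfl
            have hget' : ∀ z, paths'.get? z = if z ∈ F then some xc else paths.get? z := by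
              intro z; rw [hpadef, pvInsertAll_get?]
            have hagree : ∀ c : pvCell, some c ∈ visited → paths'.get? c = paths.get? c := by
              intro c hcv
              rw [hget']
              rw [if_neg (fun hcF => hFnotv c hcF (hsubv _ hcv))]
            -- the new invariant
            have hInv' : PvInv maps finish visited' stackB' paths' := by
              refine { hnd := PySem.Set.nodup_add visited (some xc) hInv.hnd,
                       hv := ?_, hs := ?_, hfin := ?_, hval := ?_, hkey := ?_, hfe := ?_ }
              · intro z hz
                rcases (PySem.Set.mem_add _ _ _).mp hz with h | h
                · exact hInv.hv z h
                · subst h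
                  exact hInv.hs _ (List.mem_cons_self)
              · intro e he
                rcases List.mem_append.mp he with h | h
                · obtain ⟨q, hqF, rfl⟩ := List.mem_map.mp h
                  have : q ∈ maps := pvNext_sub_maps maps xc q (hFsub q (List.mem_reverse.mp hqF))
                  simp only [pvU, List.mem_cons, List.mem_map]
                  exact Or.inr ⟨q, this, rfl⟩
                · exact hInv.hs e (List.mem_cons_of_mem _ h)
              · intro h
                rcases (PySem.Set.mem_add _ _ _).mp h with h | h
                · exact hInv.hfin h
                · exact hxf h.symm
              · intro z y hz
                rw [hget'] at hz
                by_cases hzF : z ∈ F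
                · rw [if_pos hzF] at hz
                  injection hz with hz'
                  rw [← hz']
                  exact hxcv'
                · rw [if_neg hzF] at hz
                  exact hsubv _ (hInv.hval z y hz)
              · intro z y hz hzv
                rw [hget'] at hz
                by_cases hzF : z ∈ F
                · rw [hsbdef]
                  simp only [List.map_append, List.map_map, List.mem_append]
                  refine Or.inl ?_
                  simp only [List.mem_map, Function.comp]
                  exact ⟨z, List.mem_reverse.mpr hzF, rfl⟩
                · rw [if_neg hzF] at hz
                  have hzv0 : some z ∉ visited := fun h => hzv (hsubv _ h)
                  have := hInv.hkey z y hz hzv0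
                  simp only [List.map_cons, List.mem_cons] at this
                  rcases this with h | h
                  · exact absurd (h ▸ hxcv') hzv
                  · rw [hsbdef]
                    simp only [List.map_append, List.mem_append]
                    exact Or.inr h
              · intro q f L hq hfirst
                rw [hsbdef, pvFirst_append, pvFirst_pushed] at hfirst
                by_cases hqF : q ∈ (F.reverse).map some
                · rw [if_pos hqF] at hfirst
                  simp only [Option.elim_some, Option.some.injEq, Prod.mk.injEq] at hfirst
                  obtain ⟨hf, hL⟩ := hfirst
                  subst hf
                  subst hL
                  refine ⟨Or.inr hxcv', ?_⟩
                  obtain ⟨c, hcrev, rfl⟩ := List.mem_map.mp hqF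
                  have hcF : c ∈ F := List.mem_reverse.mp hcrev
                  show paths'.get? c = some xc ∧
                    ∀ n, visited'.length ≤ n → luck' = pvWalk maps finish paths' n (some xc) 0
                  refine ⟨by rw [hget', if_pos hcF], ?_⟩
                  intro n hn
                  rw [hvlen'] at hn
                  obtain ⟨m, rfl⟩ : ∃ m, n = m + 1 := ⟨n - 1, by omega⟩
                  have hgxc : paths'.get? xc = f0 := by rw [hget', if_neg hxcF]; exact hg0
                  simp only [pvWalk]
                  rw [hgxc]
                  by_cases hlen : 1 < (List.filter (fun q => decide (some q ≠ f0)) ns).length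
                  · rw [if_pos ⟨hxf, hlen⟩]
                    rw [pvWalk_acc]
                    rw [pvWalk_stab maps finish paths paths' visited hInv.hval hagree m f0 0 hf0vis]
                    rw [← hL0w m (by omega)]
                    rw [hluckdef, if_pos hlen]
                    ring
                  · rw [if_neg (fun hco => hlen hco.2)]
                    rw [pvWalk_stab maps finish paths paths' visited hInv.hval hagree m f0 0 hf0vis]
                    rw [← hL0w m (by omega)]
                    rw [hluckdef, if_neg hlen]
                · rw [if_neg hqF] at hfirst
                  simp only [Option.elim_none] at hfirst
                  have hq0 : q ∉ visited := fun h => hq (hsubv _ h)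
                  have hqxc : ¬ ((some xc : Option pvCell) = q) := fun h => hq (h ▸ hxcv')
                  have hold := hInv.hfe q f L hq0 (by
                    simpa only [pvFirst, if_neg hqxc] using hfirst)
                  refine ⟨?_, ?_⟩
                  · rcases hold.1 with h | h
                    · exact Or.inl h
                    · exact Or.inr (hsubv _ h)
                  · cases q with
                    | none => exact hold.2
                    | some c =>
                      have hcF : c ∉ F := by
                        intro hcF
                        exact hqF (List.mem_map.mpr ⟨c, List.mem_reverse.mpr hcF, rfl⟩)
                      have hold2 : paths.get? c = f ∧
                          ∀ n, visited.length ≤ n → L = pvWalk maps finish paths n f 0 := hold.2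
                      show paths'.get? c = f ∧
                        ∀ n, visited'.length ≤ n → L = pvWalk maps finish paths' n f 0
                      refine ⟨by rw [hget', if_neg hcF]; exact hold2.1, ?_⟩
                      intro n hn
                      rw [hvlen'] at hn
                      rw [pvWalk_stab maps finish paths paths' visited hInv.hval hagree n f 0 hold.1]
                      exact hold2.2 n (by omega)
            -- measure
            have hFlen : F.length ≤ 8 :=
              le_trans (List.length_filter_le _ _) (pvNext_len maps xc)
            have hvle' : visited'.length ≤ 1 + maps.length :=
              pvVis_le maps visited' hInv'.hnd hInv'.hv
            have hPhi' : stackB'.length + 9 * (1 + maps.length - visited'.length) ≤ fl := by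
              rw [hsbdef]
              simp only [List.length_append, List.length_map, List.length_reverse,
                List.length_cons] at hPhi ⊢
              omega
            have key := ih visited' stackB' paths' hInv' hPhi' wf hwf
            have hmap : stackB'.map (fun x => x.1) = F.reverse.map some ++ rest.map (fun x => x.1) := by
              rw [hsbdef]
              simp [List.map_append, List.map_map, Function.comp]
            rw [hmap] at key
            exact key

-- ---- initial state ----

theorem pvU_mono (s : PySem.Set pvCell) (x : pvCell) (z : Option pvCell) (h : z ∈ pvU s) :
    z ∈ pvU (PySem.Set.add s x) := by
  rcases z with _ | c
  · simp [pvU]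
  · simp only [pvU, List.mem_cons, List.mem_map] at h ⊢
    rcases h with h | ⟨a, ha, hac⟩
    · exact absurd h (by simp)
    · exact Or.inr ⟨a, (PySem.Set.mem_add _ _ _).mpr (Or.inl ha), hac⟩

theorem pvScanAux (matrix : List String) :
    ∀ (l : List pvCell) (acc : PySem.Set pvCell × Option pvCell × Option pvCell),
      acc.2.1 ∈ pvU acc.1 →
      (l.foldl (pvScanStep matrix) acc).2.1 ∈ pvU (l.foldl (pvScanStep matrix) acc).1 := by
  intro l
  induction l with
  | nil => intro acc h; exact h
  | cons p l ih =>
    intro acc hacc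
    rw [List.foldl_cons]
    apply ih
    unfold pvScanStep
    split
    · exact hacc
    · dsimp only
      split
      · exact pvU_mono _ _ _ hacc
      · split
        · simp only [pvU, List.mem_cons, List.mem_map]
          exact Or.inr ⟨p, (PySem.Set.mem_add _ _ _).mpr (Or.inr rfl), rfl⟩
        · exact pvU_mono _ _ _ hacc

theorem pvScan_start (matrix : List String) :
    (pvScan matrix).2.1 ∈ pvU (pvScan matrix).1 := by
  unfold pvScan
  exact pvScanAux matrix _ _ (by simp [pvU])

theorem pvDictNil_get? (z : pvCell) : (PySem.Dict.mk ([] : List (pvCell × pvCell))).get? z = none :=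
  (PySem.Dict.get?_eq_none_iff_contains _ z).mpr rfl

theorem pvInv0 (matrix : List String) :
    PvInv (pvScan matrix).1 (pvScan matrix).2.2 PySem.Set.empty
      [((pvScan matrix).2.1, none, 0)] (PySem.Dict.mk []) := by
  refine { hnd := List.nodup_nil, hv := ?_, hfin := ?_, hs := ?_, hval := ?_, hkey := ?_, hfe := ?_ }
  · intro z hz
    cases hz
  · intro e he
    rcases List.mem_cons.mp he with h | h
    · subst h; exact pvScan_start matrix
    · cases h
  · intro h
    cases h
  · intro z y hz
    rw [pvDictNil_get?] at hz; cases hz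
  · intro z y hz
    rw [pvDictNil_get?] at hz; cases hz
  · intro q f L hq hfirst
    unfold pvFirst at hfirst
    split at hfirst
    · simp only [Option.some.injEq, Prod.mk.injEq] at hfirst
      obtain ⟨hf, hL⟩ := hfirst
      subst hf
      subst hL
      refine ⟨Or.inl rfl, ?_⟩
      cases q with
      | none => exact ⟨rfl, rfl⟩
      | some c =>
        refine ⟨pvDictNil_get? c, ?_⟩
        intro n _
        rw [pvWalk_none]
    · cases hfirst

-- ===== VERDICT (by name: the statement is the Claim_ definition above) =====
theorem countLuck_spec : Claim_equal_countLuck := by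
  intro matrix k hdom hpre
  unfold Spec_countLuck countLuck countLuck_alt
  rw [altScan_eq matrix hpre.1 hpre.2.1]
  have hmain := pvMain (pvScan matrix).1 (pvScan matrix).2.2
    (1 + 9 * (1 + (pvScan matrix).1.length))
    PySem.Set.empty [((pvScan matrix).2.1, none, 0)] (PySem.Dict.mk [])
    (pvInv0 matrix)
    (by simp only [List.length_cons, List.length_nil, PySem.Set.empty]; omega)
    ((pvScan matrix).1.length + 2) (by omega)
  simp only [List.map_cons, List.map_nil] at hmain
  show (if pvWalk (pvScan matrix).1 (pvScan matrix).2.2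
      (pvLoopA (pvScan matrix).1 (pvScan matrix).2.2 (1 + 9 * (1 + (pvScan matrix).1.length))
        PySem.Set.empty [(pvScan matrix).2.1] (PySem.Dict.mk []))
      ((pvScan matrix).1.length + 2) (pvScan matrix).2.2 0 = k then "Impressed" else "Oops!") =
    (cond ((altRun (pvScan matrix).1 (pvScan matrix).2.2 (9 * (pvScan matrix).1.length + 10)
      PySem.Set.empty [((pvScan matrix).2.1, none, 0)]) == k) "Impressed" "Oops!")
  rw [altRun_eq,
    show 9 * (pvScan matrix).1.length + 10 = 1 + 9 * (1 + (pvScan matrix).1.length) from by ring,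
    hmain]
  simp [cond_eq_if, beq_iff_eq]
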